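-- pv_equiv track=rewrite | github.com/Laurii1i/MyProjects | src/UI/EtsiTuotteita.py | find_children_parent_relations
-- ===== SOURCE A (Python) =====
-- def find_children_parent_relations(data_rows):
--
--     parent_children = []
--     has_been_seen = []
--
--     for row in data_rows:
--         product_name = row[0]
--         if product_name not in has_been_seen:
--             parent_children.append((row, []))
--             has_been_seen.append(product_name)
--         else:
--             parent_children[-1][1].append(row)
--
--     return parent_children
-- ===== SOURCE B (Python) =====
-- def find_children_parent_relations(data_rows):
--     # Two-phase consumption: repeatedly peel off a parent row, then span off the
--     # contiguous run of already-seen-name rows as its children in one slice.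
--     result = []
--     seen = set()
--     rest = data_rows
--     while rest:
--         parent, rest = rest[0], rest[1:]
--         seen.add(parent[0])
--         k = 0
--         for row in rest:
--             if row[0] in seen:
--                 k += 1
--             else:
--                 break
--         result.append((parent, rest[:k]))
--         rest = rest[k:]
--     return result
-- ===== Notes on version B (the rewrite author's own statement) =====
-- stated objective: alternative
-- what changed: Instead of accumulating each row into the last bucket of a growing result list (with an O(p) list membership test per row), B consumes the input segment-wise: it peels off a parent, measures the span of following already-seen-name rows, and emits the whole (parent, children-slice) pair at once, tracking seen names in a set.
import Mathlib
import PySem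

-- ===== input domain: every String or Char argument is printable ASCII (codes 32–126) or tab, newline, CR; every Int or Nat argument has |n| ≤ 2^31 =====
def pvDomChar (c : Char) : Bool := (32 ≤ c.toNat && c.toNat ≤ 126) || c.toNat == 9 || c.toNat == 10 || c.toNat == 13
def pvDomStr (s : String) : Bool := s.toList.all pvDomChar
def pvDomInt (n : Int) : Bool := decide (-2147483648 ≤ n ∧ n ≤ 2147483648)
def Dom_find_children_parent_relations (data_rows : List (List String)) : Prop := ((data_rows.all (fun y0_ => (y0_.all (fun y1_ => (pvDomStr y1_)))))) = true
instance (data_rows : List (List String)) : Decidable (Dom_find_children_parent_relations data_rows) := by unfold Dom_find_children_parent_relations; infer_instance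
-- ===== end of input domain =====

-- B peels the input segment-wise (parent, then a spanned run of already-seen-name child rows)
-- instead of A's row-by-row accumulation into the last bucket; objective: alternative decomposition.


-- ===== PORT A =====
-- one loop iteration of A: row[0]; if unseen, open a new (row, []) bucket, else append row
-- to the children of the last bucket (parent_children[-1][1].append(row))
def pvStepA (st : List (List String × List (List String)) × List String) (row : List String) :
    List (List String × List (List String)) × List String :=
  let product_name := (PySem.List.pyGet? row 0).getD ""
  if product_name ∈ st.2 then
    match st.1.getLast? with
    | some last => (st.1.dropLast ++ [(last.1, last.2 ++ [row])], st.2)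
    | none => st          -- unreachable: has_been_seen nonempty forces parent_children nonempty
  else
    (st.1 ++ [(row, [])], st.2 ++ [product_name])

def find_children_parent_relations (data_rows : List (List String)) :
    List (List String × List (List String)) :=
  (data_rows.foldl pvStepA ([], [])).1

-- ===== PORT B =====
-- the inner 'for row in rest: … break' loop of Source B: length of the prefix of seen-name rows
def pvChildCount (seen : PySem.Set String) : List (List String) → Nat
  | [] => 0
  | row :: rows =>
    if PySem.Set.contains seen ((PySem.List.pyGet? row 0).getD "") then pvChildCount seen rows + 1
    else 0

-- the 'while rest:' loop of Source B, with its state (rest, seen, result)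
def pvGoB (rest : List (List String)) (seen : PySem.Set String)
    (result : List (List String × List (List String))) :
    List (List String × List (List String)) :=
  match rest with
  | [] => result
  | parent :: rest' =>
    let seen' := PySem.Set.add seen ((PySem.List.pyGet? parent 0).getD "")
    let k := pvChildCount seen' rest'
    pvGoB (rest'.drop k) seen' (result ++ [(parent, rest'.take k)])
termination_by rest.length
decreasing_by simp

def find_children_parent_relations_alt (data_rows : List (List String)) :
    List (List String × List (List String)) :=
  pvGoB data_rows PySem.Set.empty []

-- ===== PRECONDITION & SPEC =====
-- Pre_ excludes inputs containing an empty row: there 'row[0]' raises IndexError in A (and in B).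
def Pre_find_children_parent_relations (data_rows : List (List String)) : Prop :=
  ∀ row ∈ data_rows, row ≠ []
instance (data_rows : List (List String)) : Decidable (Pre_find_children_parent_relations data_rows) := by unfold Pre_find_children_parent_relations; infer_instance

def pvWitness_find_children_parent_relations : List (List String) :=
  [["a", "1"], ["a", "2"], ["b"], ["a", "3"]]

def Spec_find_children_parent_relations (data_rows : List (List String)) (out : List (List String × List (List String))) : Prop := out = find_children_parent_relations_alt data_rows
instance (data_rows : List (List String)) (out : List (List String × List (List String))) : Decidable (Spec_find_children_parent_relations data_rows out) := by unfold Spec_find_children_parent_relations; infer_instance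

-- ===== CLAIM (what is proved, stated in full; the proofs are below) =====
def Claim_equal_find_children_parent_relations : Prop := ∀ (data_rows : List (List String)), Dom_find_children_parent_relations data_rows → Pre_find_children_parent_relations data_rows → Spec_find_children_parent_relations data_rows (find_children_parent_relations data_rows)

-- ===== LEMMAS AND PROOFS =====

lemma pvGoB_nil (s : PySem.Set String) (res : List (List String × List (List String))) :
    pvGoB [] s res = res := by rw [pvGoB]

lemma pvGoB_cons (p : List String) (rest : List (List String)) (s : PySem.Set String)
    (res : List (List String × List (List String))) :
    pvGoB (p :: rest) s res =
      pvGoB (rest.drop (pvChildCount (PySem.Set.add s ((PySem.List.pyGet? p 0).getD "")) rest))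
        (PySem.Set.add s ((PySem.List.pyGet? p 0).getD ""))
        (res ++ [(p, rest.take (pvChildCount (PySem.Set.add s ((PySem.List.pyGet? p 0).getD "")) rest))]) := by
  rw [pvGoB]

-- Invariant: A's fold, started with a nonempty bucket list whose seen-list matches the set s,
-- first fills the last bucket for pvChildCount s rows steps, then behaves like pvGoB.
lemma pvMain : ∀ (rows : List (List String)) (pc : List (List String × List (List String)))
    (parent : List String) (children : List (List String)) (seen : List String)
    (s : PySem.Set String), (∀ n, n ∈ seen ↔ n ∈ s) →
    (rows.foldl pvStepA (pc ++ [(parent, children)], seen)).1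
      = pvGoB (rows.drop (pvChildCount s rows)) s
          (pc ++ [(parent, children ++ rows.take (pvChildCount s rows))]) := by
  intro rows
  induction rows with
  | nil =>
    intro pc parent children seen s _
    simp [pvChildCount, pvGoB_nil]
  | cons r rs ih =>
    intro pc parent children seen s hs
    by_cases hmem : ((PySem.List.pyGet? r 0).getD "") ∈ s
    · -- seen name: A appends r to the last bucket; the child count is one larger
      have hseen : ((PySem.List.pyGet? r 0).getD "") ∈ seen := (hs _).mpr hmem
      have hc : pvChildCount s (r :: rs) = pvChildCount s rs + 1 := by
        simp [pvChildCount, hmem]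
      have hstep : pvStepA (pc ++ [(parent, children)], seen) r
          = (pc ++ [(parent, children ++ [r])], seen) := by
        simp [pvStepA, hseen]
      rw [List.foldl_cons, hstep, ih pc parent (children ++ [r]) seen s hs, hc]
      simp
    · -- new name: A opens a new bucket; pvGoB takes one step on the same parent
      have hseen : ((PySem.List.pyGet? r 0).getD "") ∉ seen := fun h => hmem ((hs _).mp h)
      have hcontains : PySem.Set.contains s ((PySem.List.pyGet? r 0).getD "") = false := by
        rw [Bool.eq_false_iff]
        intro h
        exact hmem ((PySem.Set.contains_iff s _).mp h)
      have hc : pvChildCount s (r :: rs) = 0 := by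
        simp [pvChildCount, hmem]
      have hstep : pvStepA (pc ++ [(parent, children)], seen) r
          = ((pc ++ [(parent, children)]) ++ [(r, [])], seen ++ [(PySem.List.pyGet? r 0).getD ""]) := by
        simp [pvStepA, hseen]
      have hequiv : ∀ n, n ∈ seen ++ [(PySem.List.pyGet? r 0).getD ""] ↔
          n ∈ PySem.Set.add s ((PySem.List.pyGet? r 0).getD "") := by
        intro n
        simp [PySem.Set.mem_add, hs n]
      rw [List.foldl_cons, hstep,
        ih (pc ++ [(parent, children)]) r [] _ (PySem.Set.add s ((PySem.List.pyGet? r 0).getD "")) hequiv,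
        hc]
      rw [List.drop_zero, List.take_zero, pvGoB_cons]
      simp

-- ===== VERDICT (by name: the statement is the Claim_ definition above) =====
theorem find_children_parent_relations_spec : Claim_equal_find_children_parent_relations := by
  intro data_rows _ _
  unfold Spec_find_children_parent_relations find_children_parent_relations find_children_parent_relations_alt
  cases data_rows with
  | nil => simp [pvGoB_nil]
  | cons r rs =>
    have hstep : pvStepA ([], []) r = ([] ++ [(r, [])], [(PySem.List.pyGet? r 0).getD ""]) := by
      simp [pvStepA]
    have hequiv : ∀ n, n ∈ [(PySem.List.pyGet? r 0).getD ""] ↔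
        n ∈ PySem.Set.add PySem.Set.empty ((PySem.List.pyGet? r 0).getD "") := by
      intro n
      simp [PySem.Set.empty]
    rw [List.foldl_cons, hstep,
      pvMain rs [] r [] _ (PySem.Set.add PySem.Set.empty ((PySem.List.pyGet? r 0).getD "")) hequiv,
      pvGoB_cons]
    simp
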